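-- pv_equiv track=rewrite | github.com/hermanstehouwer/adventofcode2022 | lib/types/trees.py | line_to_score
-- ===== SOURCE A (Python) =====
-- from typing import Iterator, AnyStr, List, Tuple
--
-- def line_to_score(line: List[int], ft = None, c = 0) -> int:
--     if ft is None:
--         return line_to_score(line[1:], line[0], 0)
--     if not line:
--         return c
--     if line[0] >= ft:
--         return c+1
--     return line_to_score(line[1:], ft, c+1)
-- ===== SOURCE B (Python) =====
-- def line_to_score(line, ft=None, c=0):
--     if ft is None:
--         ft = line[0]
--         line = line[1:]
--         c = 0
--     idx = next((i for i, x in enumerate(line) if x >= ft), None)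
--     return c + len(line) if idx is None else c + idx + 1
-- ===== Notes on version B (the rewrite author's own statement) =====
-- stated objective: idiomatic
-- what changed: Replaced the accumulator recursion (which copies the list via line[1:] at every step) by a single first-match-index search (next over enumerate) plus arithmetic c+idx+1 / c+len(line).
-- outside the precondition, e.g. on line_to_score([], None, 0): A raises IndexError, B raises IndexError
import Mathlib
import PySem

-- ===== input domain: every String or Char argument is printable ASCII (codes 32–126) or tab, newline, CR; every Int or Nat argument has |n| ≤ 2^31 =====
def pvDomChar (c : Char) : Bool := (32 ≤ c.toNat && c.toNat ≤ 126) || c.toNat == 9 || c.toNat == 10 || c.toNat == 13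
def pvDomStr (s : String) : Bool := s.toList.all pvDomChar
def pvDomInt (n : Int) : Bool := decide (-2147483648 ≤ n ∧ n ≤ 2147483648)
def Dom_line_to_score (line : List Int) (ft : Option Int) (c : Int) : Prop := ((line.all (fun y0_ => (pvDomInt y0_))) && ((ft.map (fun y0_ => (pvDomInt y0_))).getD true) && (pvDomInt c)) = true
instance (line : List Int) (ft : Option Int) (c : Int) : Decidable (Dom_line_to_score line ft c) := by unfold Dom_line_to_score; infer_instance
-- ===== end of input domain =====

-- B replaces A's accumulator recursion by a first-match-index search plus arithmetic (idiomatic).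
-- ===== PORT A =====
def line_to_score (line : List Int) (ft : Option Int) (c : Int) : Int :=
  match ft with
  | none =>
    -- Python: line_to_score(line[1:], line[0], 0); line[0] raises on []; [] excluded by Pre_
    match line with
    | [] => 0
    | x :: rest => line_to_score rest (some x) 0
  | some f =>
    match line with
    | [] => c
    | x :: rest => if x ≥ f then c + 1 else line_to_score rest (some f) (c + 1)

-- ===== PORT B =====
-- the `next((i for i, x in enumerate(line) if x >= ft), None)` search
def line_to_score_alt_find (line : List Int) (f : Int) : Option Nat :=
  line.findIdx? (fun x => x ≥ f)

def line_to_score_alt (line : List Int) (ft : Option Int) (c : Int) : Int :=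
  match ft with
  | none =>
    match line with
    | [] => 0  -- line[0] raises on []; [] excluded by Pre_
    | x :: rest =>
      match line_to_score_alt_find rest x with
      | none => 0 + rest.length
      | some i => 0 + (i : Int) + 1
  | some f =>
    match line_to_score_alt_find line f with
    | none => c + line.length
    | some i => c + (i : Int) + 1

-- ===== PRECONDITION & SPEC =====
-- Pre_ excludes only the inputs where Python A raises IndexError: ft = None with an empty list.
def Pre_line_to_score (line : List Int) (ft : Option Int) (c : Int) : Prop :=
  ft = none → line ≠ []
instance (line : List Int) (ft : Option Int) (c : Int) : Decidable (Pre_line_to_score line ft c) := by unfold Pre_line_to_score; infer_instance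
def pvWitness_line_to_score : List Int × Option Int × Int := ([3, 1, 4], none, 0)

def Spec_line_to_score (line : List Int) (ft : Option Int) (c : Int) (out : Int) : Prop := out = line_to_score_alt line ft c
instance (line : List Int) (ft : Option Int) (c : Int) (out : Int) : Decidable (Spec_line_to_score line ft c out) := by unfold Spec_line_to_score; infer_instance

-- ===== CLAIM (what is proved, stated in full; the proofs are below) =====
def Claim_equal_line_to_score : Prop := ∀ (line : List Int) (ft : Option Int) (c : Int), Dom_line_to_score line ft c → Pre_line_to_score line ft c → Spec_line_to_score line ft c (line_to_score line ft c)

-- ===== LEMMAS AND PROOFS =====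
lemma line_to_score_some_eq (line : List Int) (f c : Int) :
    line_to_score line (some f) c =
      (match line_to_score_alt_find line f with
       | none => c + line.length
       | some i => c + (i : Int) + 1) := by
  induction line generalizing c with
  | nil => simp [line_to_score, line_to_score_alt_find]
  | cons x rest ih =>
    simp only [line_to_score, line_to_score_alt_find, List.findIdx?_cons]
    by_cases h : x ≥ f
    · simp [h]
    · simp only [h, decide_false, Bool.false_eq_true, if_false]
      rw [ih]
      rcases hf : rest.findIdx? (fun x => decide (x ≥ f)) with _ | i <;>
        simp [line_to_score_alt_find, hf, List.length_cons] <;> ring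

-- ===== VERDICT (by name: the statement is the Claim_ definition above) =====
theorem line_to_score_spec : Claim_equal_line_to_score := by
  intro line ft c _ hpre
  unfold Spec_line_to_score
  match ft with
  | some f =>
    simp only [line_to_score_alt]
    exact line_to_score_some_eq line f c
  | none =>
    match line, hpre rfl with
    | x :: rest, _ =>
      simp only [line_to_score, line_to_score_alt]
      exact line_to_score_some_eq rest x 0
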